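-- pv_equiv track=rewrite | github.com/mills-lab/spectre | SPECtre.py | regroup_coordinates
-- ===== SOURCE A (Python) =====
-- def regroup_coordinates(coords):
-- 	first = last = coords[0]
-- 	for n in coords[1:]:
-- 		if n-1 == last:
-- 			last = n
-- 		else:
-- 			yield first, last
-- 			first = last = n
-- 	yield first, last
-- ===== SOURCE B (Python) =====
-- def regroup_coordinates(coords):
--     # gap pairs: adjacent positions where the run of consecutive ints breaks
--     gaps = [pair for pair in zip(coords, coords[1:]) if pair[1] != pair[0] + 1]
--     starts = [coords[0]] + [b for (a, b) in gaps]
--     ends = [a for (a, b) in gaps] + [coords[-1]]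
--     return list(zip(starts, ends))
-- ===== Notes on version B (the rewrite author's own statement) =====
-- stated objective: alternative
-- what changed: Replaces the stateful generator loop with a whole-list formulation: collect the adjacent pairs where consecutiveness breaks, derive the start and end lists from them, and zip them into ranges (return value compared as a list; A yields lazily).
import Mathlib
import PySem

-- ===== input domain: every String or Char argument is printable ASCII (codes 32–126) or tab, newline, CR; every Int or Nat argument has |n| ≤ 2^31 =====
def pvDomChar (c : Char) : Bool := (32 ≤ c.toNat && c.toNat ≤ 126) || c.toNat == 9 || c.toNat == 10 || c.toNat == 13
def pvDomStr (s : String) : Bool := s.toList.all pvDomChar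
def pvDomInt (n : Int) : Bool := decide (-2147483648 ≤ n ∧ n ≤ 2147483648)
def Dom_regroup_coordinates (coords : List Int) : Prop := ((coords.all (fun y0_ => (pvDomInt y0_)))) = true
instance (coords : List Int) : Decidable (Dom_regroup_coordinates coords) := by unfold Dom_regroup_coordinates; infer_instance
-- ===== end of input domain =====

-- B restates the grouping as a whole-list computation (gap pairs → starts/ends → zip)
-- instead of A's one-pass stateful loop; same O(n) cost, equivalence of the generated
-- list of ranges is proved (A is a generator; the claim is about the yielded sequence).

-- ===== PORT A =====
def regroupA_loop (first last : Int) : List Int → List (Int × Int)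
  | [] => [(first, last)]
  | n :: rest =>
      if n - 1 = last then regroupA_loop first n rest
      else (first, last) :: regroupA_loop n n rest

def regroup_coordinates (coords : List Int) : List (Int × Int) :=
  match PySem.List.pyGet? coords 0 with
  | none => []   -- Python raises IndexError here; excluded by Pre_
  | some c => regroupA_loop c c (PySem.List.slice coords (some 1) none)

-- ===== PORT B =====
def regroup_coordinates_alt (coords : List Int) : List (Int × Int) :=
  let gaps := (coords.zip (PySem.List.slice coords (some 1) none)).filter
      (fun p => p.2 ≠ p.1 + 1)
  let starts := PySem.List.pyGetD coords 0 0 :: gaps.map Prod.snd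
  let ends := gaps.map Prod.fst ++ [PySem.List.pyGetD coords (-1) 0]
  starts.zip ends

-- ===== PRECONDITION & SPEC =====
-- A (once iterated) raises IndexError on the empty list (coords[0]); so does B.
def Pre_regroup_coordinates (coords : List Int) : Prop := coords ≠ []
instance (coords : List Int) : Decidable (Pre_regroup_coordinates coords) := by
  unfold Pre_regroup_coordinates; infer_instance
def pvWitness_regroup_coordinates : List Int := [1, 2, 5, 7, 8]

def Spec_regroup_coordinates (coords : List Int) (out : List (Int × Int)) : Prop := out = regroup_coordinates_alt coords
instance (coords : List Int) (out : List (Int × Int)) : Decidable (Spec_regroup_coordinates coords out) := by unfold Spec_regroup_coordinates; infer_instance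

-- ===== CLAIM (what is proved, stated in full; the proofs are below) =====
def Claim_equal_regroup_coordinates : Prop := ∀ (coords : List Int), Dom_regroup_coordinates coords → Pre_regroup_coordinates coords → Spec_regroup_coordinates coords (regroup_coordinates coords)

-- ===== LEMMAS AND PROOFS =====

theorem getLastD_cons_aux (n last : Int) (xs : List Int) :
    (n :: xs).getLast?.getD last = xs.getLast?.getD n := by
  simp only [← List.getLastD_eq_getLast?, List.getLastD_cons]

-- Loop invariant: A's loop on xs with accumulated (first, last) produces exactly
-- B's zip-of-starts-and-ends computed over the list last :: xs.
theorem regroupA_loop_eq (xs : List Int) : ∀ (first last : Int),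
    regroupA_loop first last xs =
      (first :: (((last :: xs).zip xs).filter (fun p => p.2 ≠ p.1 + 1)).map Prod.snd).zip
        ((((last :: xs).zip xs).filter (fun p => p.2 ≠ p.1 + 1)).map Prod.fst
          ++ [xs.getLastD last]) := by
  induction xs with
  | nil => intro first last; simp [regroupA_loop]
  | cons n xs ih =>
      intro first last
      by_cases h : n - 1 = last
      · have hf : ¬ (n ≠ last + 1) := by omega
        simp [regroupA_loop, h, hf, List.zip, ih first n, getLastD_cons_aux]
      · have hf : (n ≠ last + 1) := by omega
        simp [regroupA_loop, h, hf, List.zip, ih n n, getLastD_cons_aux]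

-- ===== VERDICT (by name: the statement is the Claim_ definition above) =====
theorem regroup_coordinates_spec : Claim_equal_regroup_coordinates := by
  intro coords _ hpre
  obtain ⟨c, rest, rfl⟩ : ∃ c rest, coords = c :: rest := by
    cases coords with
    | nil => exact absurd rfl hpre
    | cons c rest => exact ⟨c, rest, rfl⟩
  unfold Spec_regroup_coordinates regroup_coordinates regroup_coordinates_alt
  rw [PySem.List.slice_from_one]
  simp only [List.tail_cons, PySem.List.pyGet?_zero_cons, PySem.List.pyGetD_zero_cons,
    PySem.List.pyGetD_neg_one (c :: rest) 0 hpre]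
  rw [regroupA_loop_eq]
  congr 1
  simp [List.getLast_eq_getLastD]
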